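-- pv_equiv track=rewrite | github.com/holyketzer/ctci_v6 | python/made_2020/f.py | count_for
-- ===== SOURCE A (Python) =====
-- from collections import defaultdict
--
-- def merge(res, res2):
--     for key in res2.keys():
--         res[key] += res2[key]
--
--     return res
--
-- def mult(res, count):
--     for item in res.keys():
--             res[item] *= count
--
--     return res
--
-- def count_for(dish, reciepts, cache):
--     if dish in cache:
--         return cache[dish].copy()
--
--     res = defaultdict(int)
--     if dish in reciepts:
--         reciept = reciepts[dish]
--
--         for item in reciept.keys():
--             if item in reciepts:
--                 res = merge(res, mult(count_for(item, reciepts, cache), reciept[item]))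
--             else:
--                 res[item] += reciept[item]
--
--         cache[dish] = res.copy()
--         return res
--     else:
--         return { dish: 1 }
-- ===== SOURCE B (Python) =====
-- def count_for(dish, reciepts, cache):
--     if dish in cache:
--         return dict(cache[dish])
--     if dish not in reciepts:
--         return {dish: 1}
--     res = {}
--     for item, cnt in reciepts[dish].items():
--         if item in reciepts:
--             for base, c in count_for(item, reciepts, cache).items():
--                 res[base] = res.get(base, 0) + c * cnt
--         else:
--             res[item] = res.get(item, 0) + cnt
--     return res
-- ===== Notes on version B (the rewrite author's own statement) =====
-- stated objective: simpler
-- what changed: A is a cache-mutating memoized recursion built on defaultdict with separate in-place merge() and mult() passes over intermediate dicts; B is a short pure recursion that only reads the given cache and folds each sub-result into the accumulator in one inline multiply-and-add pass, trading A's memoization for plainness (proved: memoized and unmemoized expansion return the same value on every input where A returns, i.e. whenever the recipe-reference graph has no cycle reachable from dish).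
import Mathlib
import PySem

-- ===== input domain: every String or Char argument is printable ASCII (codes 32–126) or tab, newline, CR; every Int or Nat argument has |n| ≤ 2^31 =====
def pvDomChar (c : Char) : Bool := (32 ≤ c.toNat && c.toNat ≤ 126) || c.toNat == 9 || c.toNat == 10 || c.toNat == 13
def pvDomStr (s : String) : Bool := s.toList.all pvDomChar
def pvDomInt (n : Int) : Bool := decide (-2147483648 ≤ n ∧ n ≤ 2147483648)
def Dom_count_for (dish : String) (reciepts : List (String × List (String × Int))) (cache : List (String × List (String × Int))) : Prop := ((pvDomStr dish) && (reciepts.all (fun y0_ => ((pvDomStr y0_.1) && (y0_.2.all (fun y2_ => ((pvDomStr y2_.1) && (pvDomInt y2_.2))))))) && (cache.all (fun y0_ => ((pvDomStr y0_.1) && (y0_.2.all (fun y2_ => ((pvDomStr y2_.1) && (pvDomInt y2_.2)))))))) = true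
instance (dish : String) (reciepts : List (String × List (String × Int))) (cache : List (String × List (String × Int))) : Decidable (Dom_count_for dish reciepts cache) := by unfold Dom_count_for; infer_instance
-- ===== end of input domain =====

-- B replaces A's cache-mutating memoized recursion (defaultdict + merge/mult in-place passes) with a plain pure
-- recursive accumulation that only READS the given cache; return values are proved equal — A additionally mutates
-- its `cache` argument (memoization), B leaves it untouched, a side effect outside this equivalence.

-- ===== PORT A =====
-- defaultdict-style add: res[k] += v  (missing key counts as 0; new keys append, existing keys keep position)
def pvDadd (d : PySem.Dict String Int) (k : String) (v : Int) : PySem.Dict String Int :=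
  d.insert k (d.getD k 0 + v)

-- merge(res, res2): for key in res2.keys(): res[key] += res2[key]
def pvMerge (res : PySem.Dict String Int) (res2 : List (String × Int)) : PySem.Dict String Int :=
  res2.foldl (fun r p => pvDadd r p.1 p.2) res

-- mult(res, count): in-place scaling of every value, key order kept = map
def pvMult (res : List (String × Int)) (count : Int) : List (String × Int) :=
  res.map (fun p => (p.1, p.2 * count))

-- A's recursion, cache threaded through (Python mutates `cache`); fuel only makes it total —
-- under Pre_ (no recipe-reference cycle reachable from dish) the fuel reciepts.length+1 is never exhausted
def pvCountA (fuel : Nat) (dish : String)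
    (reciepts cache : PySem.Dict String (List (String × Int))) :
    List (String × Int) × PySem.Dict String (List (String × Int)) :=
  match fuel with
  | 0 => ([], cache)
  | fuel + 1 =>
    match cache.get? dish with
    | some v => (v, cache)                                  -- return cache[dish].copy()
    | none =>
      match reciepts.get? dish with
      | some reciept =>
        let st := reciept.foldl
          (fun (st : PySem.Dict String Int × PySem.Dict String (List (String × Int))) p =>
            if (reciepts.get? p.1).isSome then
              -- res = merge(res, mult(count_for(item, reciepts, cache), reciept[item]));
              -- the single recursive call's pair is written by its two projections
              (pvMerge st.1 (pvMult (pvCountA fuel p.1 reciepts st.2).1 p.2),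
                (pvCountA fuel p.1 reciepts st.2).2)
            else (pvDadd st.1 p.1 p.2, st.2))
          (PySem.Dict.mk [], cache)
        (st.1.items, st.2.insert dish st.1.items)           -- cache[dish] = res.copy(); return res
      | none => ([(dish, 1)], cache)
  termination_by fuel

def count_for (dish : String) (reciepts : List (String × List (String × Int))) (cache : List (String × List (String × Int))) : List (String × Int) :=
  (pvCountA (reciepts.length + 1) dish (PySem.Dict.mk reciepts) (PySem.Dict.mk cache)).1

-- ===== PORT B =====
-- B: pure recursion, no memoization, one inline multiply-and-add pass per sub-result
def pvCountB (fuel : Nat) (dish : String)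
    (reciepts cache : PySem.Dict String (List (String × Int))) : List (String × Int) :=
  match fuel with
  | 0 => []
  | fuel + 1 =>
    match cache.get? dish with
    | some v => v                                            -- return dict(cache[dish])
    | none =>
      match reciepts.get? dish with
      | none => [(dish, 1)]
      | some reciept =>
        (reciept.foldl
          (fun (res : PySem.Dict String Int) p =>
            if (reciepts.get? p.1).isSome then
              (pvCountB fuel p.1 reciepts cache).foldl
                (fun r q => r.insert q.1 (r.getD q.1 0 + q.2 * p.2)) res
            else res.insert p.1 (res.getD p.1 0 + p.2))
          (PySem.Dict.mk [])).items
  termination_by fuel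

def count_for_alt (dish : String) (reciepts : List (String × List (String × Int))) (cache : List (String × List (String × Int))) : List (String × Int) :=
  pvCountB (reciepts.length + 1) dish (PySem.Dict.mk reciepts) (PySem.Dict.mk cache)

-- ===== PRECONDITION & SPEC =====
-- the recipe-reference edges Python's recursion follows: from an uncached recipe dish to the
-- recipe-valued items of its recipe (a cached or non-recipe dish recurses no further)
def pvSuccs (rl cl : List (String × List (String × Int))) (d : String) : List String :=
  if ((PySem.Dict.mk cl).get? d).isSome then []
  else
    match (PySem.Dict.mk rl).get? d with
    | none => []
    | some r => (r.map Prod.fst).filter (fun v => ((PySem.Dict.mk rl).get? v).isSome)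

-- `pvBnd rl cl f d` = every reference chain starting at d has fewer than f edges (a pure graph property)
def pvBnd (rl cl : List (String × List (String × Int))) : Nat → String → Bool
  | 0, _ => false
  | f + 1, d => (pvSuccs rl cl d).all (pvBnd rl cl f)

-- Pre_ excludes exactly the inputs on which A raises RecursionError (and B does too): those whose
-- recipe-reference graph has a cycle reachable from dish, i.e. a reference chain longer than the
-- number of recipes; on every other input A returns normally and equality is claimed.
def Pre_count_for (dish : String) (reciepts : List (String × List (String × Int))) (cache : List (String × List (String × Int))) : Prop :=
  pvBnd reciepts cache (reciepts.length + 1) dish = true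
instance (dish : String) (reciepts : List (String × List (String × Int))) (cache : List (String × List (String × Int))) : Decidable (Pre_count_for dish reciepts cache) := by unfold Pre_count_for; infer_instance

def pvWitness_count_for : String × (List (String × List (String × Int))) × (List (String × List (String × Int))) :=
  ("a", [("b", [("y", 3)]), ("a", [("b", 2), ("x", 1)])], [("c", [("z", 5)])])

def Spec_count_for (dish : String) (reciepts : List (String × List (String × Int))) (cache : List (String × List (String × Int))) (out : List (String × Int)) : Prop := out = count_for_alt dish reciepts cache
instance (dish : String) (reciepts : List (String × List (String × Int))) (cache : List (String × List (String × Int))) (out : List (String × Int)) : Decidable (Spec_count_for dish reciepts cache out) := by unfold Spec_count_for; infer_instance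

-- ===== CLAIM (what is proved, stated in full; the proofs are below) =====
def Claim_equal_count_for : Prop := ∀ (dish : String) (reciepts : List (String × List (String × Int))) (cache : List (String × List (String × Int))), Dom_count_for dish reciepts cache → Pre_count_for dish reciepts cache → Spec_count_for dish reciepts cache (count_for dish reciepts cache)

-- ===== LEMMAS AND PROOFS =====

-- invariant of A's threaded cache: every entry already equals B's value, and it only extends the initial cache
def pvInv (rl cl : List (String × List (String × Int)))
    (c : PySem.Dict String (List (String × Int))) : Prop :=
  (∀ k v, c.get? k = some v →
      pvCountB (rl.length + 1) k (PySem.Dict.mk rl) (PySem.Dict.mk cl) = v) ∧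
  (∀ k, c.get? k = none → (PySem.Dict.mk cl).get? k = none)

theorem pvBnd_succ (rl cl : List (String × List (String × Int))) {f : Nat} {d : String}
    {reciept : List (String × Int)} {p : String × Int}
    (hb : pvBnd rl cl (f + 1) d = true)
    (hc0 : (PySem.Dict.mk cl).get? d = none)
    (hr : (PySem.Dict.mk rl).get? d = some reciept)
    (hp : p ∈ reciept) (hs : ((PySem.Dict.mk rl).get? p.1).isSome = true) :
    pvBnd rl cl f p.1 = true := by
  unfold pvBnd pvSuccs at hb
  rw [hc0] at hb
  simp only [Option.isSome_none, if_false, Bool.false_eq_true, hr, List.all_eq_true] at hb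
  exact hb p.1 (List.mem_filter.mpr ⟨List.mem_map_of_mem hp, hs⟩)

theorem pvBnd_mono (rl cl : List (String × List (String × Int))) :
    ∀ f d, pvBnd rl cl f d = true → pvBnd rl cl (f + 1) d = true := by
  intro f
  induction f with
  | zero => intro d h; simp [pvBnd] at h
  | succ f ih =>
    intro d h
    unfold pvBnd at h ⊢
    rw [List.all_eq_true] at h ⊢
    exact fun v hv => ih v (h v hv)

theorem pvBnd_le (rl cl : List (String × List (String × Int))) {f g : Nat} {d : String}
    (hfg : f ≤ g) (h : pvBnd rl cl f d = true) : pvBnd rl cl g d = true := by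
  obtain ⟨k, rfl⟩ : ∃ k, g = f + k := ⟨g - f, by omega⟩
  clear hfg
  induction k with
  | zero => exact h
  | succ k ih => exact pvBnd_mono rl cl (f + k) d ih

-- B's value is fuel-independent once the fuel bounds every reference chain
theorem pvStab (rl cl : List (String × List (String × Int))) :
    ∀ f d, pvBnd rl cl f d = true → ∀ g, f ≤ g →
      pvCountB g d (PySem.Dict.mk rl) (PySem.Dict.mk cl)
        = pvCountB f d (PySem.Dict.mk rl) (PySem.Dict.mk cl) := by
  intro f
  induction f with
  | zero => intro d h; simp [pvBnd] at h
  | succ f ih =>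
    intro d hb g hg
    obtain ⟨g', rfl⟩ : ∃ g', g = g' + 1 := ⟨g - 1, by omega⟩
    cases hc : (PySem.Dict.mk cl).get? d with
    | some v => simp [pvCountB, hc]
    | none =>
      cases hr : (PySem.Dict.mk rl).get? d with
      | none => simp [pvCountB, hc, hr]
      | some reciept =>
        simp only [pvCountB, hc, hr]
        congr 1
        apply PySem.List.foldl_congr_mem
        intro acc p hp
        by_cases hs : ((PySem.Dict.mk rl).get? p.1).isSome = true
        · simp only [hs, if_true]
          have hbp := pvBnd_succ rl cl hb hc hr hp hs
          rw [ih p.1 hbp g' (by omega)]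
        · simp [hs]

-- the canonical (full-fuel) version of B's fold step
def pvStepC (rl cl : List (String × List (String × Int))) :
    PySem.Dict String Int → (String × Int) → PySem.Dict String Int := fun res p =>
  if ((PySem.Dict.mk rl).get? p.1).isSome then
    (pvCountB (rl.length + 1) p.1 (PySem.Dict.mk rl) (PySem.Dict.mk cl)).foldl
      (fun r q => r.insert q.1 (r.getD q.1 0 + q.2 * p.2)) res
  else res.insert p.1 (res.getD p.1 0 + p.2)

-- B's full-fuel value at an uncached recipe dish is the canonical fold
theorem pvBeq (rl cl : List (String × List (String × Int))) {d : String} {reciept : List (String × Int)}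
    (hb : pvBnd rl cl (rl.length + 1) d = true)
    (hc0 : (PySem.Dict.mk cl).get? d = none)
    (hr : (PySem.Dict.mk rl).get? d = some reciept) :
    pvCountB (rl.length + 1) d (PySem.Dict.mk rl) (PySem.Dict.mk cl)
      = (reciept.foldl (pvStepC rl cl) (PySem.Dict.mk [])).items := by
  simp only [pvCountB, hc0, hr]
  congr 1
  apply PySem.List.foldl_congr_mem
  intro acc p hp
  unfold pvStepC
  by_cases hs : ((PySem.Dict.mk rl).get? p.1).isSome = true
  · simp only [hs, if_true]
    have hbp := pvBnd_succ rl cl hb hc0 hr hp hs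
    rw [pvStab rl cl rl.length p.1 hbp (rl.length + 1) (by omega)]
  · simp [hs]

theorem pvFold (rl cl : List (String × List (String × Int)))
    (f : Nat)
    (HIH : ∀ d c, pvInv rl cl c → pvBnd rl cl f d = true →
      (pvCountA f d (PySem.Dict.mk rl) c).1
          = pvCountB (rl.length + 1) d (PySem.Dict.mk rl) (PySem.Dict.mk cl)
        ∧ pvInv rl cl (pvCountA f d (PySem.Dict.mk rl) c).2) :
    ∀ (sub : List (String × Int)) (res : PySem.Dict String Int)
      (c : PySem.Dict String (List (String × Int))), pvInv rl cl c →
      (∀ p ∈ sub, ((PySem.Dict.mk rl).get? p.1).isSome = true → pvBnd rl cl f p.1 = true) →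
      (sub.foldl
          (fun (st : PySem.Dict String Int × PySem.Dict String (List (String × Int))) p =>
            if ((PySem.Dict.mk rl).get? p.1).isSome then
              (pvMerge st.1 (pvMult (pvCountA f p.1 (PySem.Dict.mk rl) st.2).1 p.2),
                (pvCountA f p.1 (PySem.Dict.mk rl) st.2).2)
            else (pvDadd st.1 p.1 p.2, st.2)) (res, c)).1
        = sub.foldl (pvStepC rl cl) res
      ∧ pvInv rl cl (sub.foldl
          (fun (st : PySem.Dict String Int × PySem.Dict String (List (String × Int))) p =>
            if ((PySem.Dict.mk rl).get? p.1).isSome then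
              (pvMerge st.1 (pvMult (pvCountA f p.1 (PySem.Dict.mk rl) st.2).1 p.2),
                (pvCountA f p.1 (PySem.Dict.mk rl) st.2).2)
            else (pvDadd st.1 p.1 p.2, st.2)) (res, c)).2 := by
  intro sub
  induction sub with
  | nil => intro res c hinv _; exact ⟨rfl, hinv⟩
  | cons p sub ih =>
    intro res c hinv hsub
    simp only [List.foldl_cons]
    by_cases hs : ((PySem.Dict.mk rl).get? p.1).isSome = true
    · obtain ⟨hv, hinv'⟩ := HIH p.1 c hinv (hsub p (List.mem_cons_self) hs)
      have hstep :
          (if ((PySem.Dict.mk rl).get? p.1).isSome then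
              (pvMerge res (pvMult (pvCountA f p.1 (PySem.Dict.mk rl) c).1 p.2),
                (pvCountA f p.1 (PySem.Dict.mk rl) c).2)
            else (pvDadd res p.1 p.2, c))
          = (pvStepC rl cl res p, (pvCountA f p.1 (PySem.Dict.mk rl) c).2) := by
        simp only [hs, if_true, pvStepC]
        rw [hv]
        simp [pvMerge, pvMult, List.foldl_map, pvDadd]
      rw [hstep]
      exact ih (pvStepC rl cl res p) _ hinv' (fun q hq hqs => hsub q (List.mem_cons_of_mem p hq) hqs)
    · have hstep :
          (if ((PySem.Dict.mk rl).get? p.1).isSome then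
              (pvMerge res (pvMult (pvCountA f p.1 (PySem.Dict.mk rl) c).1 p.2),
                (pvCountA f p.1 (PySem.Dict.mk rl) c).2)
            else (pvDadd res p.1 p.2, c))
          = (pvStepC rl cl res p, c) := by
        simp [hs, pvStepC, pvDadd]
      rw [hstep]
      exact ih (pvStepC rl cl res p) c hinv (fun q hq hqs => hsub q (List.mem_cons_of_mem p hq) hqs)

theorem pvMain (rl cl : List (String × List (String × Int))) :
    ∀ f, f ≤ rl.length + 1 → ∀ d c, pvInv rl cl c → pvBnd rl cl f d = true →
      (pvCountA f d (PySem.Dict.mk rl) c).1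
          = pvCountB (rl.length + 1) d (PySem.Dict.mk rl) (PySem.Dict.mk cl)
        ∧ pvInv rl cl (pvCountA f d (PySem.Dict.mk rl) c).2 := by
  intro f
  induction f with
  | zero => intro _ d c _ hb; simp [pvBnd] at hb
  | succ f ih =>
    intro hfn d c hinv hb
    cases hc : c.get? d with
    | some v =>
      refine ⟨?_, ?_⟩
      · simp only [pvCountA, hc]; exact (hinv.1 d v hc).symm
      · simp only [pvCountA, hc]; exact hinv
    | none =>
      have hc0 : (PySem.Dict.mk cl).get? d = none := hinv.2 d hc
      cases hr : (PySem.Dict.mk rl).get? d with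
      | none =>
        refine ⟨?_, ?_⟩
        · simp [pvCountA, hc, hr, pvCountB, hc0]
        · simp only [pvCountA, hc, hr]; exact hinv
      | some reciept =>
        have hsub : ∀ p ∈ reciept, ((PySem.Dict.mk rl).get? p.1).isSome = true →
            pvBnd rl cl f p.1 = true := fun p hp hs => pvBnd_succ rl cl hb hc0 hr hp hs
        obtain ⟨hfold1, hfold2⟩ := pvFold rl cl f
          (fun d' c' hinv' hb' => ih (by omega) d' c' hinv' hb')
          reciept (PySem.Dict.mk []) c hinv hsub
        have hbn : pvBnd rl cl (rl.length + 1) d = true := pvBnd_le rl cl hfn hb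
        have hBeq := pvBeq rl cl hbn hc0 hr
        refine ⟨?_, ?_⟩
        · simp only [pvCountA, hc, hr]
          rw [hfold1, ← hBeq]
        · simp only [pvCountA, hc, hr]
          constructor
          · intro k v hk
            rw [PySem.Dict.get?_insert] at hk
            split at hk
            · rename_i hkd
              subst hkd
              rw [hfold1] at hk
              rw [hBeq]
              exact Option.some.inj hk
            · exact hfold2.1 k v hk
          · intro k hk
            rw [PySem.Dict.get?_insert] at hk
            split at hk
            · exact absurd hk (by simp)
            · exact hfold2.2 k hk

-- ===== VERDICT (by name: the statement is the Claim_ definition above) =====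
theorem count_for_spec : Claim_equal_count_for := by
  intro dish rl cl _ hpre
  unfold Spec_count_for count_for count_for_alt
  have hinv : pvInv rl cl (PySem.Dict.mk cl) := by
    constructor
    · intro k v hk
      simp [pvCountB, hk]
    · intro k hk; exact hk
  exact (pvMain rl cl (rl.length + 1) (le_refl _) dish (PySem.Dict.mk cl) hinv hpre).1
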